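-- pv_equiv track=rewrite | github.com/slawa19/DocxAICorrector | document_pipeline.py | _is_heading_like_alpha_token
-- ===== SOURCE A (Python) =====
-- def _is_heading_like_alpha_token(token: str) -> bool:
--     stripped = token.strip("\"'“”‘’()[]{}<>«»,-—–:;,.!?")
--     if not stripped:
--         return False
--
--     alpha_chars = [char for char in stripped if char.isalpha()]
--     if not alpha_chars:
--         return False
--
--     if all(char.isupper() for char in alpha_chars):
--         return True
--
--     for char in stripped:
--         if char.isalpha():
--             return char.isupper()
--     return False
-- ===== SOURCE B (Python) =====
-- def _is_heading_like_alpha_token(token: str) -> bool: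
--     stripped = token.strip("\"'“”‘’()[]{}<>«»,-—–:;,.!?")
--     for char in stripped:
--         if char.isalpha():
--             return char.isupper()
--     return False
-- ===== Notes on version B (the rewrite author's own statement) =====
-- stated objective: simpler
-- what changed: B replaces A's three-stage check (emptiness test, alpha-filter comprehension, all-uppercase pass, then a first-alpha scan) by a single early-returning scan that reports the case of the first alphabetic character of the stripped token, since all-alpha-uppercase already implies the first alpha is uppercase.
import Mathlib
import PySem

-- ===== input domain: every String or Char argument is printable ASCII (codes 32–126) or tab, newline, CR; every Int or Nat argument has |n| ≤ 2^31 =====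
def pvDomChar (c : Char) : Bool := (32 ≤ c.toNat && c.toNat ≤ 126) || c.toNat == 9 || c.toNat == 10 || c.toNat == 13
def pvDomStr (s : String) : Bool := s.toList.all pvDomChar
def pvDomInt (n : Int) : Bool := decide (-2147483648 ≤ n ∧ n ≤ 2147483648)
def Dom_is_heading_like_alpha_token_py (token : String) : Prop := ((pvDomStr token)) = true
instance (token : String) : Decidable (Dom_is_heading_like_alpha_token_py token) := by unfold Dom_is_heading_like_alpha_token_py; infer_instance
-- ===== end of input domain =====

-- B replaces A's filter/all-uppercase passes by a single scan returning the case of the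
-- first alphabetic character of the stripped token (objective: simpler; same result).

-- ===== PORT A =====
def pvPunct : String := "\"'“”‘’()[]{}<>«»,-—–:;,.!?"

-- A's final 'for char in stripped: if char.isalpha(): return char.isupper()' loop
def pvALoop : List Char -> Bool
  | [] => false
  | c :: rest => if PySem.Chars.isalpha c then PySem.Chars.isupper c else pvALoop rest

def is_heading_like_alpha_token_py (token : String) : Bool :=
  let stripped := PySem.Str.stripChars token pvPunct
  if stripped.toList.isEmpty then false
  else
    let alpha_chars := stripped.toList.filter PySem.Chars.isalpha
    if alpha_chars.isEmpty then false
    else if alpha_chars.all PySem.Chars.isupper then true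
    else pvALoop stripped.toList

-- ===== PORT B =====
-- B's single scan: case of the first alphabetic character, False if none
def pvBScan : List Char -> Bool
  | [] => false
  | c :: rest => if PySem.Chars.isalpha c then PySem.Chars.isupper c else pvBScan rest

def is_heading_like_alpha_token_py_alt (token : String) : Bool :=
  pvBScan (PySem.Str.stripChars token pvPunct).toList

-- ===== PRECONDITION & SPEC =====
def Spec_is_heading_like_alpha_token_py (token : String) (out : Bool) : Prop := out = is_heading_like_alpha_token_py_alt token
instance (token : String) (out : Bool) : Decidable (Spec_is_heading_like_alpha_token_py token out) := by unfold Spec_is_heading_like_alpha_token_py; infer_instance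

-- ===== CLAIM (what is proved, stated in full; the proofs are below) =====
def Claim_equal_is_heading_like_alpha_token_py : Prop := ∀ (token : String), Dom_is_heading_like_alpha_token_py token → Spec_is_heading_like_alpha_token_py token (is_heading_like_alpha_token_py token)

-- ===== LEMMAS AND PROOFS =====

theorem pvBScan_eq_filter (l : List Char) :
    pvBScan l = match l.filter PySem.Chars.isalpha with
      | [] => false
      | c :: _ => PySem.Chars.isupper c := by
  induction l with
  | nil => rfl
  | cons c rest ih =>
    simp only [pvBScan, List.filter_cons]
    by_cases h : PySem.Chars.isalpha c
    · simp [h]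
    · simp [h, ih]

theorem pvALoop_eq_pvBScan (l : List Char) : pvALoop l = pvBScan l := by
  induction l with
  | nil => rfl
  | cons c rest ih => simp only [pvALoop, pvBScan, ih]

theorem pvMain (l : List Char) :
    (if l.isEmpty then false
     else
       let alpha_chars := l.filter PySem.Chars.isalpha
       if alpha_chars.isEmpty then false
       else if alpha_chars.all PySem.Chars.isupper then true
       else pvALoop l) = pvBScan l := by
  simp only [List.isEmpty_iff]
  by_cases h0 : l = []
  · simp [h0, pvBScan]
  · simp only [h0, if_false]
    rw [pvBScan_eq_filter]
    cases hf : l.filter PySem.Chars.isalpha with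
    | nil => simp
    | cons c rest =>
      simp only [List.all_cons]
      by_cases hu : (PySem.Chars.isupper c && (rest.all PySem.Chars.isupper)) = true
      · rw [if_pos hu]; exact (((Bool.and_eq_true _ _).mp hu).1).symm
      · rw [if_neg hu, pvALoop_eq_pvBScan, pvBScan_eq_filter, hf]; simp

-- ===== VERDICT (by name: the statement is the Claim_ definition above) =====
theorem is_heading_like_alpha_token_py_spec : Claim_equal_is_heading_like_alpha_token_py := by
  intro token _
  unfold Spec_is_heading_like_alpha_token_py is_heading_like_alpha_token_py is_heading_like_alpha_token_py_alt
  exact pvMain (PySem.Str.stripChars token pvPunct).toList
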